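-- pv_equiv track=rewrite | github.com/ymk-scsa/A2AI | src/data_collection/data_validator.py | _find_consecutive_missing_years
-- ===== SOURCE A (Python) =====
-- from typing import Dict, List, Tuple, Optional, Union
--
-- def _find_consecutive_missing_years(expected_years: List[int],
--                                     actual_years: List[int]) -> int:
--     """連続欠損年数計算"""
--     actual_set = set(actual_years)
--     max_consecutive = 0
--     current_consecutive = 0
--
--     for year in expected_years:
--         if year not in actual_set:
--             current_consecutive += 1
--             max_consecutive = max(max_consecutive, current_consecutive)
--         else:
--             current_consecutive = 0
--
--     return max_consecutive
-- ===== SOURCE B (Python) =====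
-- from itertools import groupby
-- from typing import List
--
-- def _find_consecutive_missing_years(expected_years: List[int],
--                                     actual_years: List[int]) -> int:
--     """Longest run of expected years absent from actual_years: group the
--     expected sequence into maximal present/missing runs, take the max run length."""
--     actual_set = set(actual_years)
--     return max((sum(1 for _ in grp)
--                 for missing, grp in groupby(expected_years,
--                                             key=lambda y: y not in actual_set)
--                 if missing),
--                default=0)
-- ===== Notes on version B (the rewrite author's own statement) =====
-- stated objective: idiomatic
-- what changed: Replaced the explicit running-counter/reset loop with itertools.groupby: the expected sequence is split into maximal present/missing runs and the answer is the max over missing-run lengths (default 0).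
import Mathlib
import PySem

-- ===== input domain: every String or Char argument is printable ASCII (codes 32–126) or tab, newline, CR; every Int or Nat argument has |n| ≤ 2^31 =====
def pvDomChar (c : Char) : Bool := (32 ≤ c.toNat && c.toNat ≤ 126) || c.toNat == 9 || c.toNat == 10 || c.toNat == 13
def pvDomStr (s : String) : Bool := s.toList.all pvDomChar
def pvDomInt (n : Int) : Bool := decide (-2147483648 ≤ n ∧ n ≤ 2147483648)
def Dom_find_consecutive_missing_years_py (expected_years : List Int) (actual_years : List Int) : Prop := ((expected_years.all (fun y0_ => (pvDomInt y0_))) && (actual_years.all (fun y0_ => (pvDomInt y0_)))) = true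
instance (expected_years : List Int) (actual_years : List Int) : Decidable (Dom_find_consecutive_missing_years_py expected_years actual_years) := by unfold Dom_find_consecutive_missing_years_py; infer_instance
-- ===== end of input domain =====

-- B replaces A's running-counter/reset loop by grouping the expected sequence into
-- maximal missing runs and taking the max run length (idiomatic; same cost).

-- ===== PORT A =====
def find_consecutive_missing_years_py (expected_years : List Int) (actual_years : List Int) : Int :=
  let actual_set := PySem.Set.ofList actual_years
  -- state = (max_consecutive, current_consecutive)
  (expected_years.foldl
    (fun (s : Int × Int) year =>
      if year ∉ actual_set then (max s.1 (s.2 + 1), s.2 + 1)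
      else (s.1, 0))
    ((0 : Int), (0 : Int))).1

-- ===== PORT B =====
-- groupby over the 'missing' key: extract each maximal missing run (takeWhile) and recurse
-- past it (dropWhile); present elements are skipped.
def pvMissRuns (actual_set : PySem.Set Int) : List Int → List Int
  | [] => []
  | x :: xs =>
    if x ∈ actual_set then pvMissRuns actual_set xs
    else (((x :: xs).takeWhile (fun y => decide (y ∉ actual_set))).length : Int) ::
         pvMissRuns actual_set ((x :: xs).dropWhile (fun y => decide (y ∉ actual_set)))
termination_by l => l.length
decreasing_by
  · simp
  · rw [show List.dropWhile (fun y => decide (y ∉ actual_set)) (x :: xs)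
          = List.dropWhile (fun y => decide (y ∉ actual_set)) xs from
        List.dropWhile_cons_of_pos (by simpa using (by assumption : x ∉ actual_set))]
    have := List.length_dropWhile_le (fun y => decide (y ∉ actual_set)) xs
    simpa using Nat.lt_succ_of_le this

def find_consecutive_missing_years_py_alt (expected_years : List Int) (actual_years : List Int) : Int :=
  let actual_set := PySem.Set.ofList actual_years
  -- max(run lengths, default=0)
  (PySem.List.max? (pvMissRuns actual_set expected_years) (fun n => n)).getD 0

-- ===== PRECONDITION & SPEC =====
def Spec_find_consecutive_missing_years_py (expected_years : List Int) (actual_years : List Int) (out : Int) : Prop := out = find_consecutive_missing_years_py_alt expected_years actual_years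
instance (expected_years : List Int) (actual_years : List Int) (out : Int) : Decidable (Spec_find_consecutive_missing_years_py expected_years actual_years out) := by unfold Spec_find_consecutive_missing_years_py; infer_instance

-- ===== CLAIM (what is proved, stated in full; the proofs are below) =====
def Claim_equal_find_consecutive_missing_years_py : Prop := ∀ (expected_years : List Int) (actual_years : List Int), Dom_find_consecutive_missing_years_py expected_years actual_years → Spec_find_consecutive_missing_years_py expected_years actual_years (find_consecutive_missing_years_py expected_years actual_years)

-- ===== LEMMAS AND PROOFS =====

-- reference function: best missing streak of xs given that a streak of length c is open
def pvH (s : PySem.Set Int) (c : Int) : List Int → Int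
  | [] => 0
  | y :: ys => if y ∉ s then max (c + 1) (pvH s (c + 1) ys) else pvH s 0 ys

lemma pvH_nonneg (s : PySem.Set Int) : ∀ (xs : List Int) (c : Int), 0 ≤ pvH s c xs := by
  intro xs
  induction xs with
  | nil => intro c; simp [pvH]
  | cons y ys ih =>
    intro c
    by_cases hy : y ∉ s <;> simp [pvH, hy] <;> first
      | exact Or.inr (ih _) | exact ih _

lemma pvA_loop (s : PySem.Set Int) :
    ∀ (xs : List Int) (m c : Int), 0 ≤ m →
      (xs.foldl (fun (st : Int × Int) year =>
        if year ∉ s then (max st.1 (st.2 + 1), st.2 + 1) else (st.1, 0)) (m, c)).1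
      = max m (pvH s c xs) := by
  intro xs
  induction xs with
  | nil => intro m c hm; simp [pvH]; omega
  | cons y ys ih =>
    intro m c hm
    by_cases hy : y ∉ s
    · simp only [List.foldl_cons, if_pos hy, pvH]
      rw [ih _ _ (le_max_of_le_left hm)]
      omega
    · simp only [List.foldl_cons, if_neg hy, pvH]
      rw [ih _ _ hm]

lemma pvH_prefix (s : PySem.Set Int) :
    ∀ (t : List Int) (r : List Int) (c : Int), t ≠ [] → (∀ y ∈ t, y ∉ s) →
      (∀ z, r.head? = some z → z ∈ s) →
      pvH s c (t ++ r) = max (c + t.length) (pvH s 0 r) := by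
  intro t
  induction t with
  | nil => intro r c ht; exact absurd rfl ht
  | cons y t' ih =>
    intro r c _ hmiss hr
    have hy : y ∉ s := hmiss y (List.mem_cons_self)
    simp only [List.cons_append, pvH, if_pos hy]
    rcases eq_or_ne t' [] with h' | h'
    · subst h'
      simp only [List.nil_append, List.length_cons, List.length_nil]
      have hrr : pvH s (c + 1) r = pvH s 0 r := by
        cases r with
        | nil => rfl
        | cons z zs =>
          have hz : z ∈ s := hr z rfl
          simp [pvH, hz]
      rw [hrr]; push_cast; ring_nf
    · rw [ih r (c + 1) h' (fun y hy' => hmiss y (List.mem_cons_of_mem _ hy')) hr]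
      have := pvH_nonneg s r 0
      simp only [List.length_cons]
      push_cast
      omega

lemma foldl_max_ge (l : List Int) : ∀ a : Int, a ≤ l.foldl max a := by
  induction l with
  | nil => intro a; simp
  | cons x l ih => intro a; exact le_trans (le_max_left a x) (ih _)

lemma foldl_max_split (l : List Int) : ∀ a : Int, 0 ≤ a →
    l.foldl max a = max a (l.foldl max 0) := by
  induction l with
  | nil => intro a ha; simp; omega
  | cons x l ih =>
    intro a ha
    have h0 : (0 : Int) ≤ l.foldl max 0 := foldl_max_ge l 0
    simp only [List.foldl_cons]
    rw [ih (max a x) (le_trans ha (le_max_left a x)), ih (max 0 x) (le_max_left 0 x)]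
    omega

lemma pvRuns_main (s : PySem.Set Int) :
    ∀ (xs : List Int), (pvMissRuns s xs).foldl max 0 = pvH s 0 xs := by
  intro xs
  induction xs using pvMissRuns.induct s with
  | case1 => simp [pvMissRuns, pvH]
  | case2 x xs hx ih =>
    rw [pvMissRuns]
    simp only [if_pos hx]
    rw [ih]
    simp [pvH, hx]
  | case3 x xs hx ih =>
    rw [pvMissRuns]
    simp only [if_neg hx]
    set p : Int → Bool := fun y => decide (y ∉ s) with hp
    set t := (x :: xs).takeWhile p with ht
    set r := (x :: xs).dropWhile p with hrd
    have hpx : p x = true := by simp [hp, hx]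
    have htne : t ≠ [] := by
      rw [ht, List.takeWhile_cons_of_pos hpx]; simp
    have hlen0 : (0 : Int) ≤ (t.length : Int) := by positivity
    have hsplit : t ++ r = x :: xs := List.takeWhile_append_dropWhile
    have hstep : (((t.length : Int) :: pvMissRuns s r).foldl max 0)
        = max (t.length : Int) ((pvMissRuns s r).foldl max 0) := by
      simp only [List.foldl_cons]
      rw [foldl_max_split _ (max 0 (t.length : Int)) (le_max_left _ _)]
      have := foldl_max_ge (pvMissRuns s r) 0
      omega
    rw [hstep, ih]
    have hhead : ∀ z, r.head? = some z → z ∈ s := by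
      intro z hz
      have := List.head?_dropWhile_not p (x :: xs)
      rw [← hrd] at this
      rw [hz] at this
      simp only [hp] at this
      simpa using this
    have hmiss : ∀ y ∈ t, y ∉ s := by
      intro y hy
      have := List.mem_takeWhile_imp hy
      simpa [hp] using this
    calc max (t.length : Int) (pvH s 0 r)
        = max ((0 : Int) + t.length) (pvH s 0 r) := by ring_nf
      _ = pvH s 0 (t ++ r) := (pvH_prefix s t r 0 htne hmiss hhead).symm
      _ = pvH s 0 (x :: xs) := by rw [hsplit]

lemma maxq_eq_foldl (l : List Int) (hpos : ∀ x ∈ l, 0 ≤ x) :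
    (PySem.List.max? l (fun n => n)).getD 0 = l.foldl max 0 := by
  cases l with
  | nil => simp [PySem.List.max?]
  | cons x t =>
    rw [PySem.List.max?_id_cons]
    have hx : 0 ≤ x := hpos x (List.mem_cons_self)
    simp only [Option.getD_some, List.foldl_cons]
    rw [foldl_max_split t x hx, foldl_max_split t (max 0 x) (le_max_left _ _)]
    omega

lemma pvMissRuns_pos (s : PySem.Set Int) :
    ∀ (xs : List Int), ∀ n ∈ pvMissRuns s xs, 0 ≤ n := by
  intro xs
  induction xs using pvMissRuns.induct s with
  | case1 => simp [pvMissRuns]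
  | case2 x xs hx ih => rw [pvMissRuns]; simpa [if_pos hx] using ih
  | case3 x xs hx ih =>
    rw [pvMissRuns]
    simp only [if_neg hx, List.mem_cons]
    rintro n (rfl | hn)
    · positivity
    · exact ih n hn

-- ===== VERDICT (by name: the statement is the Claim_ definition above) =====
theorem find_consecutive_missing_years_py_spec : Claim_equal_find_consecutive_missing_years_py := by
  intro expected_years actual_years _
  unfold Spec_find_consecutive_missing_years_py
  unfold find_consecutive_missing_years_py find_consecutive_missing_years_py_alt
  simp only []
  rw [pvA_loop (PySem.Set.ofList actual_years) expected_years 0 0 le_rfl,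
      maxq_eq_foldl _ (pvMissRuns_pos _ _), pvRuns_main]
  have := pvH_nonneg (PySem.Set.ofList actual_years) expected_years 0
  omega
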